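-- pv_equiv track=rewrite | github.com/nadav-kal/Movies-Topics | main.py | limit_to_at_most_100_movies_per_year
-- ===== SOURCE A (Python) =====
-- def limit_to_at_most_100_movies_per_year(movies_topics):
--     movies_by_year = {}
--     for movie, topic in movies_topics:
--         year = movie[2][:4]
--         if not year in movies_by_year:
--             movies_by_year[year] = []
--         if len(movies_by_year[year]) < 100:
--             movies_by_year[year].append((movie, topic))
--     return movies_by_year
-- ===== SOURCE B (Python) =====
-- def limit_to_at_most_100_movies_per_year(movies_topics):
--     years = list(dict.fromkeys(movie[2][:4] for movie, _ in movies_topics))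
--     return {y: [(m, t) for m, t in movies_topics if m[2][:4] == y][:100] for y in years}
-- ===== Notes on version B (the rewrite author's own statement) =====
-- stated objective: alternative
-- what changed: B keeps no accumulator dict at all: it first computes the distinct years in first-appearance order via dict.fromkeys, then for each year rescans the whole input with a filtering comprehension and slices off the first 100 matches, instead of A's single pass that grows capped per-year buckets in a dict.
import Mathlib
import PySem

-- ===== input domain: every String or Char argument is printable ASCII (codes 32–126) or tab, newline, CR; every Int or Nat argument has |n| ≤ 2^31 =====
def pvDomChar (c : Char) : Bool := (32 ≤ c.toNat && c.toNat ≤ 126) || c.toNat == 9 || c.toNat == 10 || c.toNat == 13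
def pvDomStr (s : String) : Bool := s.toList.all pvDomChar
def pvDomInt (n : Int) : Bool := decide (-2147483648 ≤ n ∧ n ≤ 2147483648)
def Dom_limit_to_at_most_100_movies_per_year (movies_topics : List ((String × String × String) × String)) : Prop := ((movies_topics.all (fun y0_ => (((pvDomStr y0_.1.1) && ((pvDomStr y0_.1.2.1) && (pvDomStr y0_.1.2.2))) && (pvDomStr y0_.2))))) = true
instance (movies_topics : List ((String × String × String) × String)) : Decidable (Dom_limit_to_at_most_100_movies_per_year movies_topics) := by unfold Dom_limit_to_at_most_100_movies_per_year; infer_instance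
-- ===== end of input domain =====

-- B keeps no accumulator dict: it lists the distinct years (first-appearance order) and, for each,
-- rescans the input taking the first 100 matches (objective: alternative algorithm; same return value).
-- ===== PORT A =====
-- shared helper: movie[2][:4]
def pvYear (p : (String × String × String) × String) : String :=
  PySem.Str.slice p.1.2.2 none (some 4)

def limit_to_at_most_100_movies_per_year (movies_topics : List ((String × String × String) × String)) : List (String × List ((String × String × String) × String)) :=
  (movies_topics.foldl
    (fun d p =>
      let year := pvYear p
      let d1 := if d.contains year then d else d.insert year []
      if (d1.getD year []).length < 100 then d1.modify year [] (fun l => l ++ [p]) else d1)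
    PySem.Dict.empty).items

-- ===== PORT B =====
-- years = list(dict.fromkeys(...)) → PySem.List.dedup; the comprehension+slice → filter then take 100
def limit_to_at_most_100_movies_per_year_alt (movies_topics : List ((String × String × String) × String)) : List (String × List ((String × String × String) × String)) :=
  (PySem.List.dedup (movies_topics.map pvYear)).map
    (fun y => (y, (movies_topics.filter (fun p => pvYear p == y)).take 100))

-- ===== PRECONDITION & SPEC =====
def Spec_limit_to_at_most_100_movies_per_year (movies_topics : List ((String × String × String) × String)) (out : List (String × List ((String × String × String) × String))) : Prop := out = limit_to_at_most_100_movies_per_year_alt movies_topics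
instance (movies_topics : List ((String × String × String) × String)) (out : List (String × List ((String × String × String) × String))) : Decidable (Spec_limit_to_at_most_100_movies_per_year movies_topics out) := by unfold Spec_limit_to_at_most_100_movies_per_year; infer_instance

-- ===== CLAIM (what is proved, stated in full; the proofs are below) =====
def Claim_equal_limit_to_at_most_100_movies_per_year : Prop := ∀ (movies_topics : List ((String × String × String) × String)), Dom_limit_to_at_most_100_movies_per_year movies_topics → Spec_limit_to_at_most_100_movies_per_year movies_topics (limit_to_at_most_100_movies_per_year movies_topics)

-- ===== LEMMAS AND PROOFS =====

-- A's loop step (let-free restatement of the foldl body; `pv_A_eq_foldl` is rfl)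
def pvStepA (d : PySem.Dict String (List ((String × String × String) × String)))
    (p : (String × String × String) × String) :
    PySem.Dict String (List ((String × String × String) × String)) :=
  if (((if d.contains (pvYear p) then d else d.insert (pvYear p) []).getD (pvYear p) []).length) < 100
  then (if d.contains (pvYear p) then d else d.insert (pvYear p) []).modify (pvYear p) [] (fun l => l ++ [p])
  else (if d.contains (pvYear p) then d else d.insert (pvYear p) [])

theorem pv_A_eq_foldl (mt : List ((String × String × String) × String)) :
    limit_to_at_most_100_movies_per_year mt = (mt.foldl pvStepA PySem.Dict.empty).items := rfl

theorem pv_keys_stepA (d : PySem.Dict String (List ((String × String × String) × String)))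
    (p : (String × String × String) × String) :
    (pvStepA d p).keys = PySem.Set.add d.keys (pvYear p) := by
  unfold pvStepA
  by_cases h : d.contains (pvYear p)
  · have hadd : PySem.Set.add d.keys (pvYear p) = d.keys :=
      PySem.Set.add_of_mem ((PySem.Dict.contains_iff_mem_keys d (pvYear p)).mp h)
    rw [if_pos h]
    split_ifs with hlen
    · rw [PySem.Dict.keys_modify, PySem.Dict.keys_insert_of_contains d _ h, hadd]
    · rw [hadd]
  · simp only [Bool.not_eq_true] at h
    have hnm : pvYear p ∉ d.keys := fun hm => by
      have := (PySem.Dict.contains_iff_mem_keys d (pvYear p)).mpr hm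
      rw [h] at this; exact Bool.noConfusion this
    rw [if_neg (show ¬(d.contains (pvYear p) = true) from by rw [h]; exact Bool.false_ne_true),
        PySem.Dict.getD_insert_self, List.length_nil,
        if_pos (by omega)]
    rw [PySem.Dict.keys_modify,
        PySem.Dict.keys_insert_of_contains _ _ (PySem.Dict.contains_insert_self d (pvYear p) []),
        PySem.Dict.keys_insert_of_not_contains d [] h,
        PySem.Set.add_of_not_mem hnm]

theorem pv_keys_foldA (mt : List ((String × String × String) × String))
    (d : PySem.Dict String (List ((String × String × String) × String))) :
    (mt.foldl pvStepA d).keys = PySem.Set.update d.keys (mt.map pvYear) := by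
  induction mt generalizing d with
  | nil => simp [PySem.Set.update_nil]
  | cons p mt ih =>
    simp only [List.foldl_cons, List.map_cons, PySem.Set.update_cons, ih, pv_keys_stepA]

theorem pv_getD_stepA (d : PySem.Dict String (List ((String × String × String) × String)))
    (p : (String × String × String) × String) (c : String) :
    (pvStepA d p).getD c [] =
      if c = pvYear p ∧ (d.getD (pvYear p) []).length < 100
      then d.getD (pvYear p) [] ++ [p] else d.getD c [] := by
  unfold pvStepA
  by_cases h : d.contains (pvYear p)
  · rw [if_pos h]
    by_cases hlen : (d.getD (pvYear p) []).length < 100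
    · rw [if_pos hlen, PySem.Dict.getD_modify]
      by_cases hc : c = pvYear p
      · rw [if_pos hc, if_pos ⟨hc, hlen⟩]
      · rw [if_neg hc, if_neg (fun hh => hc hh.1)]
    · rw [if_neg hlen, if_neg (fun hh => hlen hh.2)]
  · simp only [Bool.not_eq_true] at h
    have h0 : d.getD (pvYear p) [] = [] := PySem.Dict.getD_of_not_contains d [] h
    rw [if_neg (show ¬(d.contains (pvYear p) = true) from by rw [h]; exact Bool.false_ne_true),
        PySem.Dict.getD_insert_self, List.length_nil,
        if_pos (by omega), PySem.Dict.getD_modify]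
    by_cases hc : c = pvYear p
    · rw [if_pos hc, if_pos ⟨hc, by rw [h0]; simp⟩, PySem.Dict.getD_insert_self, h0]
    · rw [if_neg hc, if_neg (fun hh => hc hh.1), PySem.Dict.getD_insert, if_neg hc]

theorem pv_getD_foldA (mt : List ((String × String × String) × String))
    (d : PySem.Dict String (List ((String × String × String) × String)))
    (H : ∀ c, (d.getD c []).length ≤ 100) (c : String) :
    (mt.foldl pvStepA d).getD c [] =
      (d.getD c [] ++ mt.filter (fun p => pvYear p == c)).take 100 := by
  induction mt generalizing d with
  | nil =>
    simp only [List.foldl_nil, List.filter_nil, List.append_nil]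
    exact (List.take_of_length_le (H c)).symm
  | cons p mt ih =>
    simp only [List.foldl_cons, List.filter_cons]
    have hstep := pv_getD_stepA d p
    have H' : ∀ c', ((pvStepA d p).getD c' []).length ≤ 100 := by
      intro c'
      rw [hstep c']
      split_ifs with h
      · simp only [List.length_append, List.length_cons, List.length_nil]
        omega
      · exact H c'
    rw [ih (pvStepA d p) H']
    by_cases hy : pvYear p = c
    · have hby : (pvYear p == c) = true := by simp [hy]
      rw [hby, if_pos rfl, hstep c]
      by_cases hlen : (d.getD (pvYear p) []).length < 100
      · rw [if_pos ⟨hy.symm, hlen⟩, hy]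
        simp [List.append_assoc]
      · rw [if_neg (fun h => hlen h.2)]
        have h100 : (d.getD c []).length = 100 := by
          have := H c; rw [hy] at hlen; omega
        rw [List.take_append, List.take_append, h100]
        simp [List.take_of_length_le (le_of_eq h100)]
    · have hby : (pvYear p == c) = false := by simp [hy]
      rw [hby, if_neg (by simp), hstep c, if_neg (fun h => hy h.1.symm)]

-- ===== VERDICT (by name: the statement is the Claim_ definition above) =====
theorem limit_to_at_most_100_movies_per_year_spec : Claim_equal_limit_to_at_most_100_movies_per_year := by
  intro mt _
  unfold Spec_limit_to_at_most_100_movies_per_year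
  unfold limit_to_at_most_100_movies_per_year_alt
  rw [pv_A_eq_foldl, PySem.List.dedup_eq_ofList]
  have hkA : (mt.foldl pvStepA PySem.Dict.empty).keys = PySem.Set.ofList (mt.map pvYear) := by
    rw [pv_keys_foldA]; simp [PySem.Dict.keys_empty, PySem.Set.update_nil_left]
  have hndA : (mt.foldl pvStepA PySem.Dict.empty).keys.Nodup := by
    rw [hkA]; exact PySem.Set.nodup_ofList _
  rw [PySem.Dict.items_eq_map_keys _ hndA ([] : List ((String × String × String) × String)), hkA]
  refine List.map_congr_left (fun y _ => ?_)
  rw [pv_getD_foldA mt PySem.Dict.empty (fun c => by simp [PySem.Dict.getD_empty]) y]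
  simp [PySem.Dict.getD_empty]
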